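-- pv_equiv track=rewrite | github.com/evenwebb/epic-free-games-scraper | scrape_epic_games.py | get_game_image_url
-- ===== SOURCE A (Python) =====
-- def get_game_image_url(game):
--     """Get the best image URL for a game."""
--     key_images = game.get('keyImages', [])
--
--     # Prefer OfferImageWide, then OfferImageTall, then Thumbnail
--     for image_type in ['OfferImageWide', 'OfferImageTall', 'Thumbnail']:
--         for image in key_images:
--             if image.get('type') == image_type:
--                 return image.get('url')
--
--     # If none of the preferred types found, return first image
--     if key_images:
--         return key_images[0].get('url')
--
--     return None
-- ===== SOURCE B (Python) =====
-- def get_game_image_url(game):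
--     """Get the best image URL for a game."""
--     key_images = game.get('keyImages', [])
--
--     # One pass: remember the first image's url and the url of the first
--     # occurrence of each image type.
--     first_url = None
--     seen = {}
--     for i, image in enumerate(key_images):
--         if i == 0:
--             first_url = image.get('url')
--         t = image.get('type')
--         if t is not None and t not in seen:
--             seen[t] = image.get('url')
--
--     for image_type in ['OfferImageWide', 'OfferImageTall', 'Thumbnail']:
--         if image_type in seen:
--             return seen[image_type]
--
--     return first_url
-- ===== Notes on version B (the rewrite author's own statement) =====
-- stated objective: alternative
-- what changed: Replaces A's three full rescans of key_images (one per preferred type) by a single pass that indexes the first url per type in a dict and captures the first image's url, followed by one lookup per priority type.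
import Mathlib
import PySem

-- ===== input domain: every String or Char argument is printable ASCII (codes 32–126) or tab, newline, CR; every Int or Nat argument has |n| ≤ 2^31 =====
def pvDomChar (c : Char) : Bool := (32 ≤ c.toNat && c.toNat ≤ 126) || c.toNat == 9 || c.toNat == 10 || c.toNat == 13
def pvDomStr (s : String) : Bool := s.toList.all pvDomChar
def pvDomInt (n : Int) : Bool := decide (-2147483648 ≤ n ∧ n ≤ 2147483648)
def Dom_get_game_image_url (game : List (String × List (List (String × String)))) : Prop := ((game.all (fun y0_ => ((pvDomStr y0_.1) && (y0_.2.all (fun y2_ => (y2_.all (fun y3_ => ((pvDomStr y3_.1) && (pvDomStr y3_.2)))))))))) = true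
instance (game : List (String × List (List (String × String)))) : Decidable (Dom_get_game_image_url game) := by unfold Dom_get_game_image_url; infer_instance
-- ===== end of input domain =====

-- B replaces A's three rescans of key_images (one per preferred type) by one pass
-- building a type→url dict of first occurrences plus the first image's url ("alternative").

-- ===== PORT A =====
-- image.get(k) on an image dict (assoc list, first match)
def imgGet (img : List (String × String)) (k : String) : Option String :=
  (PySem.Dict.mk img).get? k

-- inner 'for image in key_images: if image.get("type") == t: return image.get("url")'
def findByType (images : List (List (String × String))) (t : String) : Option (Option String) :=
  match images with
  | [] => none
  | img :: rest =>
    if imgGet img "type" = some t then some (imgGet img "url") else findByType rest t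

-- outer 'for image_type in [...]' with early return
def typeLoop (types : List String) (images : List (List (String × String))) : Option (Option String) :=
  match types with
  | [] => none
  | t :: rest =>
    match findByType images t with
    | some r => some r
    | none => typeLoop rest images

def get_game_image_url (game : List (String × List (List (String × String)))) : Option String :=
  let key_images := ((PySem.Dict.mk game).get? "keyImages").getD []
  match typeLoop ["OfferImageWide", "OfferImageTall", "Thumbnail"] key_images with
  | some r => r
  | none =>
    match key_images with
    | [] => none
    | img :: _ => imgGet img "url"

-- ===== PORT B =====
-- the single pass building 'seen' (first url per type)
def buildSeen (images : List (List (String × String))) (d : PySem.Dict String (Option String)) :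
    PySem.Dict String (Option String) :=
  images.foldl (fun d img =>
    match imgGet img "type" with
    | some t => if d.contains t then d else d.insert t (imgGet img "url")
    | none => d) d

-- 'for image_type in [...]: if image_type in seen: return seen[image_type]'
def prioLoop (types : List String) (seen : PySem.Dict String (Option String)) : Option (Option String) :=
  match types with
  | [] => none
  | t :: rest =>
    match seen.get? t with
    | some v => some v
    | none => prioLoop rest seen

def get_game_image_url_alt (game : List (String × List (List (String × String)))) : Option String :=
  let key_images := ((PySem.Dict.mk game).get? "keyImages").getD []
  let first_url : Option String :=
    match key_images with
    | [] => none
    | img :: _ => imgGet img "url"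
  let seen := buildSeen key_images PySem.Dict.empty
  match prioLoop ["OfferImageWide", "OfferImageTall", "Thumbnail"] seen with
  | some v => v
  | none => first_url

-- ===== PRECONDITION & SPEC =====
def Spec_get_game_image_url (game : List (String × List (List (String × String)))) (out : Option String) : Prop := out = get_game_image_url_alt game
instance (game : List (String × List (List (String × String)))) (out : Option String) : Decidable (Spec_get_game_image_url game out) := by unfold Spec_get_game_image_url; infer_instance

-- ===== CLAIM (what is proved, stated in full; the proofs are below) =====
def Claim_equal_get_game_image_url : Prop := ∀ (game : List (String × List (List (String × String)))), Dom_get_game_image_url game → Spec_get_game_image_url game (get_game_image_url game)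

-- ===== LEMMAS AND PROOFS =====

-- the dict of first occurrences answers exactly the first linear scan
theorem seen_get (images : List (List (String × String))) (d : PySem.Dict String (Option String))
    (t : String) :
    (buildSeen images d).get? t =
      match d.get? t with
      | some v => some v
      | none => findByType images t := by
  induction images generalizing d with
  | nil =>
    simp [buildSeen, findByType]
    cases d.get? t <;> rfl
  | cons img rest ih =>
    rw [buildSeen, List.foldl_cons]
    rw [show (List.foldl _ _ rest) = buildSeen rest _ from rfl]
    cases hty : imgGet img "type" with
    | none =>
      rw [ih]
      have : ¬ imgGet img "type" = some t := by simp [hty]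
      simp [findByType, this]
    | some u =>
      by_cases hut : u = t
      · subst hut
        by_cases hc : d.contains u = true
        · have hsome : (d.get? u).isSome := by
            rw [← PySem.Dict.contains_eq_isSome_get?]; exact hc
          obtain ⟨v, hv⟩ := Option.isSome_iff_exists.mp hsome
          simp [hc, ih, hv]
        · have hnone : d.get? u = none := by
            have := PySem.Dict.contains_eq_isSome_get? d u
            cases h : d.get? u
            · rfl
            · rw [h] at this; simp at this; exact absurd this hc
          simp [hc, ih, hnone, findByType, hty]
      · by_cases hc : d.contains u = true
        · have hne : ¬ imgGet img "type" = some t := by simp [hty, hut]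
          simp [hc, ih, findByType, hne]
        · have hne : ¬ imgGet img "type" = some t := by simp [hty, hut]
          simp [hc, ih, findByType, hne, PySem.Dict.get?_insert, Ne.symm hut]

theorem loops_agree (images : List (List (String × String))) (types : List String) :
    prioLoop types (buildSeen images PySem.Dict.empty) = typeLoop types images := by
  induction types with
  | nil => rfl
  | cons t rest ih =>
    rw [prioLoop, typeLoop, seen_get, PySem.Dict.get?_empty, ih]

-- ===== VERDICT (by name: the statement is the Claim_ definition above) =====
theorem get_game_image_url_spec : Claim_equal_get_game_image_url := by
  intro game _
  unfold Spec_get_game_image_url get_game_image_url get_game_image_url_alt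
  simp only [loops_agree]
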